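-- pv_equiv track=rewrite | github.com/oarjones/ai-gamedev-pipeline | mcp_blender_addon/commands/selection_sets.py | _compress_indices
-- ===== SOURCE A (Python) =====
-- from typing import Any, Dict, Iterable, List, Tuple
--
-- def _compress_indices(items: Iterable[int]) -> str:
--     # Compact range encoding: 0-3,5,7-9
--     arr = sorted({int(i) for i in items})
--     if not arr:
--         return ""
--     ranges: List[Tuple[int, int]] = []
--     start = prev = arr[0]
--     for x in arr[1:]:
--         if x == prev + 1:
--             prev = x
--             continue
--         ranges.append((start, prev))
--         start = prev = x
--     ranges.append((start, prev))
--     parts: List[str] = []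
--     for a, b in ranges:
--         parts.append(f"{a}-{b}" if a != b else f"{a}")
--     return ",".join(parts)
-- ===== SOURCE B (Python) =====
-- from typing import Iterable
--
-- def _compress_indices(items: Iterable[int]) -> str:
--     # Set-boundary method: a value starts a run iff x-1 is absent from the set,
--     # and ends a run iff x+1 is absent; sorted starts pair with sorted ends.
--     s = {int(i) for i in items}
--     starts = sorted(x for x in s if x - 1 not in s)
--     ends = sorted(x for x in s if x + 1 not in s)
--     return ",".join(f"{a}-{b}" if a != b else f"{a}" for a, b in zip(starts, ends))
-- ===== Notes on version B (the rewrite author's own statement) =====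
-- stated objective: alternative
-- what changed: Replaces A's sequential start/prev run-detection scan over the sorted array with the set-boundary method: run starts are the set elements x with x-1 absent from the set and run ends those with x+1 absent, each collected by an independent membership-filter pass, sorted, and paired by zip.
import Mathlib
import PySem

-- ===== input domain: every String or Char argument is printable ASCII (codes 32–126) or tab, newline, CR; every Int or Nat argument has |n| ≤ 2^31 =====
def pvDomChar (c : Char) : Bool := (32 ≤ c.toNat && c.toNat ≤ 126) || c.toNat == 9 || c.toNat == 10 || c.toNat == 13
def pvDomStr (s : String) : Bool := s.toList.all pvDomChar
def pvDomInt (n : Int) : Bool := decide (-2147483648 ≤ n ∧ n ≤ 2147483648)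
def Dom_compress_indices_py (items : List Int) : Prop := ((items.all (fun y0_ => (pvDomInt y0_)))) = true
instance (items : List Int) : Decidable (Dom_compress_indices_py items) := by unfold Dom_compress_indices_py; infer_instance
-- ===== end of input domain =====

-- B replaces A's sequential start/prev run-scan over the sorted array by the set-boundary method:
-- run starts are the set elements x with x-1 absent, run ends those with x+1 absent, paired after
-- sorting each list (alternative decomposition; same output, return value only).

-- ===== PORT A =====
def compress_indices_py (items : List Int) : String :=
  let arr := PySem.List.sorted (PySem.Set.ofList items) (fun x => x) false
  match arr with
  | [] => ""
  | a :: rest =>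
    -- for x in arr[1:]: maintain (ranges, start, prev)
    let st := rest.foldl
      (fun (st : List (Int × Int) × Int × Int) x =>
        if x = st.2.2 + 1 then (st.1, st.2.1, x)
        else (st.1 ++ [(st.2.1, st.2.2)], x, x))
      ([], a, a)
    let ranges := st.1 ++ [(st.2.1, st.2.2)]
    -- for a, b in ranges: parts.append(…)
    let parts := ranges.foldl
      (fun acc (p : Int × Int) =>
        acc ++ [if p.1 ≠ p.2 then PySem.Int.toStr p.1 ++ "-" ++ PySem.Int.toStr p.2
                else PySem.Int.toStr p.1]) []
    PySem.Str.join "," parts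

-- ===== PORT B =====
def compress_indices_py_alt (items : List Int) : String :=
  let s := PySem.Set.ofList items
  let starts := PySem.List.sorted (s.filter (fun x => !(PySem.Set.contains s (x - 1)))) (fun x => x) false
  let ends := PySem.List.sorted (s.filter (fun x => !(PySem.Set.contains s (x + 1)))) (fun x => x) false
  PySem.Str.join ","
    ((starts.zip ends).map
      (fun p => if p.1 ≠ p.2 then PySem.Int.toStr p.1 ++ "-" ++ PySem.Int.toStr p.2
                else PySem.Int.toStr p.1))

-- ===== PRECONDITION & SPEC =====
def Spec_compress_indices_py (items : List Int) (out : String) : Prop := out = compress_indices_py_alt items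
instance (items : List Int) (out : String) : Decidable (Spec_compress_indices_py items out) := by unfold Spec_compress_indices_py; infer_instance

-- ===== CLAIM =====
def Claim_equal_compress_indices_py : Prop := ∀ (items : List Int), Dom_compress_indices_py items → Spec_compress_indices_py items (compress_indices_py items)

-- ===== LEMMAS AND PROOFS =====

-- A's break-detection loop, written as structural recursion (proof-side characterisation)
def pvRunsA (s p : Int) : List Int → List (Int × Int)
  | [] => [(s, p)]
  | x :: xs => if x = p + 1 then pvRunsA s x xs else (s, p) :: pvRunsA x x xs

lemma pvFold_eq (xs : List Int) : ∀ (r : List (Int × Int)) (s p : Int),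
    (xs.foldl
      (fun (st : List (Int × Int) × Int × Int) x =>
        if x = st.2.2 + 1 then (st.1, st.2.1, x)
        else (st.1 ++ [(st.2.1, st.2.2)], x, x)) (r, s, p)).1 ++
      [((xs.foldl
      (fun (st : List (Int × Int) × Int × Int) x =>
        if x = st.2.2 + 1 then (st.1, st.2.1, x)
        else (st.1 ++ [(st.2.1, st.2.2)], x, x)) (r, s, p)).2.1,
        (xs.foldl
      (fun (st : List (Int × Int) × Int × Int) x =>
        if x = st.2.2 + 1 then (st.1, st.2.1, x)
        else (st.1 ++ [(st.2.1, st.2.2)], x, x)) (r, s, p)).2.2)] = r ++ pvRunsA s p xs := by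
  induction xs with
  | nil => intro r s p; simp [pvRunsA]
  | cons x xs ih =>
    intro r s p
    by_cases h : x = p + 1 <;> simp [pvRunsA, h, ih, List.append_assoc]

lemma pvRunsA_start (xs : List Int) : ∀ (s s' p : Int), ∃ b t,
    pvRunsA s p xs = (s, b) :: t ∧ pvRunsA s' p xs = (s', b) :: t := by
  induction xs with
  | nil => intro s s' p; exact ⟨p, [], rfl, rfl⟩
  | cons x xs ih =>
    intro s s' p
    by_cases h : x = p + 1
    · subst h
      obtain ⟨b, t, h1, h2⟩ := ih s s' (p + 1)
      exact ⟨b, t, by simp [pvRunsA, h1], by simp [pvRunsA, h2]⟩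
    · exact ⟨p, pvRunsA x x xs, by simp [pvRunsA, h], by simp [pvRunsA, h]⟩

-- boundary filters of a list (proof-side; membership tested in the list itself)
def pvStarts (l : List Int) : List Int := l.filter (fun x => !(decide ((x - 1) ∈ l)))
def pvEnds (l : List Int) : List Int := l.filter (fun x => !(decide ((x + 1) ∈ l)))

-- on a strictly increasing list, A's run scan is the zip of the boundary filters
lemma pvMain (xs : List Int) : ∀ (a : Int), (a :: xs).Pairwise (· < ·) →
    pvRunsA a a xs = (pvStarts (a :: xs)).zip (pvEnds (a :: xs)) := by
  induction xs with
  | nil =>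
    intro a _
    have h1 : pvStarts [a] = [a] := by simp [pvStarts, List.filter]
    have h2 : pvEnds [a] = [a] := by simp [pvEnds, List.filter]
    simp [pvRunsA, h1, h2]
  | cons x t ih =>
    intro a hp
    have hax : a < x := (List.pairwise_cons.mp hp).1 x (by simp)
    have hp' : (x :: t).Pairwise (· < ·) := (List.pairwise_cons.mp hp).2
    have hxt : ∀ y ∈ t, x < y := fun y hy => (List.pairwise_cons.mp hp').1 y hy
    have ihx := ih x hp'
    simp only [pvStarts, pvEnds] at ihx ⊢
    -- the head a always survives the starts filter of the full list
    have h1 : decide ((a - 1) ∈ a :: x :: t) = false := by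
      simp only [decide_eq_false_iff_not, List.mem_cons, not_or]
      refine ⟨by omega, by omega, fun h => ?_⟩
      have := hxt _ h; omega
    have hSfull : (a :: x :: t).filter (fun y => !(decide ((y - 1) ∈ a :: x :: t)))
        = a :: (x :: t).filter (fun y => !(decide ((y - 1) ∈ a :: x :: t))) := by
      rw [List.filter_cons]
      simp only [h1, Bool.not_false, reduceIte]
    -- x survives the starts filter of the sublist
    have h3 : decide ((x - 1) ∈ x :: t) = false := by
      simp only [decide_eq_false_iff_not, List.mem_cons, not_or]
      refine ⟨by omega, fun h => ?_⟩
      have := hxt _ h; omega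
    have hSsub : (x :: t).filter (fun y => !(decide ((y - 1) ∈ x :: t)))
        = x :: t.filter (fun y => !(decide ((y - 1) ∈ x :: t))) := by
      rw [List.filter_cons]
      simp only [h3, Bool.not_false, reduceIte]
    -- over t, the starts predicates of the full list and the sublist agree
    have hS_t : t.filter (fun y => !(decide ((y - 1) ∈ a :: x :: t)))
        = t.filter (fun y => !(decide ((y - 1) ∈ x :: t))) := by
      apply List.filter_congr
      intro y hy
      have h5 := hxt _ hy
      have : ((y - 1) ∈ a :: x :: t) ↔ ((y - 1) ∈ x :: t) := by
        rw [List.mem_cons]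
        exact ⟨fun h => h.resolve_left (by omega), Or.inr⟩
      simp [this]
    -- over x :: t, the ends predicates of the full list and the sublist agree
    have hE_xt : (x :: t).filter (fun y => !(decide ((y + 1) ∈ a :: x :: t)))
        = (x :: t).filter (fun y => !(decide ((y + 1) ∈ x :: t))) := by
      apply List.filter_congr
      intro y hy
      have h5 : a < y := by
        rcases List.mem_cons.mp hy with h | h
        · omega
        · have := hxt _ h; omega
      have : ((y + 1) ∈ a :: x :: t) ↔ ((y + 1) ∈ x :: t) := by
        rw [List.mem_cons]
        exact ⟨fun h => h.resolve_left (by omega), Or.inr⟩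
      simp [this]
    by_cases hxa : x = a + 1
    · subst hxa
      -- starts: x = a+1 is swallowed (its predecessor a is present)
      have hx1 : decide ((a + 1 - 1) ∈ a :: (a + 1) :: t) = true := by
        have : (a : Int) + 1 - 1 = a := by ring
        rw [this]; simp
      have hSdrop : ((a + 1) :: t).filter (fun y => !(decide ((y - 1) ∈ a :: (a + 1) :: t)))
          = t.filter (fun y => !(decide ((y - 1) ∈ a :: (a + 1) :: t))) := by
        simp only [List.filter_cons]
        rw [hx1]
        simp
      -- ends: a is swallowed (its successor a+1 is present)
      have hEin : decide (((a : Int) + 1) ∈ a :: (a + 1) :: t) = true := by simp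
      have hEdrop : (a :: (a + 1) :: t).filter (fun y => !(decide ((y + 1) ∈ a :: (a + 1) :: t)))
          = ((a + 1) :: t).filter (fun y => !(decide ((y + 1) ∈ a :: (a + 1) :: t))) := by
        simp only [List.filter_cons]
        rw [hEin]
        simp
      rw [hSfull, hSdrop, hS_t, hEdrop, hE_xt]
      rw [hSsub] at ihx
      have hA : pvRunsA a a ((a + 1) :: t) = pvRunsA a (a + 1) t := by
        simp [pvRunsA]
      rw [hA]
      obtain ⟨b, t₀, hr1, hr2⟩ := pvRunsA_start t a (a + 1) (a + 1)
      rw [hr2] at ihx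
      cases hE : ((a + 1) :: t).filter (fun y => !(decide ((y + 1) ∈ (a + 1) :: t))) with
      | nil => rw [hE] at ihx; simp at ihx
      | cons e E' =>
        rw [hE, List.zip_cons_cons] at ihx
        obtain ⟨he, ht⟩ := List.cons_eq_cons.mp ihx
        have heb : e = b := by
          have := congrArg Prod.snd he; simpa using this.symm
        rw [hr1, List.zip_cons_cons, ← ht, heb]
    · -- break at x: a keeps both its start and its end
      have h4 : decide ((x - 1) ∈ a :: x :: t) = false := by
        simp only [decide_eq_false_iff_not, List.mem_cons, not_or]
        refine ⟨by omega, by omega, fun h => ?_⟩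
        have := hxt _ h; omega
      have hSkeep : (x :: t).filter (fun y => !(decide ((y - 1) ∈ a :: x :: t)))
          = x :: t.filter (fun y => !(decide ((y - 1) ∈ a :: x :: t))) := by
        rw [List.filter_cons]
        simp only [h4, Bool.not_false, reduceIte]
      have h2 : decide ((a + 1) ∈ a :: x :: t) = false := by
        simp only [decide_eq_false_iff_not, List.mem_cons, not_or]
        refine ⟨by omega, by omega, fun h => ?_⟩
        have := hxt _ h; omega
      have hEkeep : (a :: x :: t).filter (fun y => !(decide ((y + 1) ∈ a :: x :: t)))
          = a :: (x :: t).filter (fun y => !(decide ((y + 1) ∈ a :: x :: t))) := by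
        rw [List.filter_cons]
        simp only [h2, Bool.not_false, reduceIte]
      rw [hSfull, hSkeep, hS_t, hEkeep, hE_xt, ← hSsub]
      have hA : pvRunsA a a (x :: t) = (a, a) :: pvRunsA x x t := by
        simp [pvRunsA, hxa]
      rw [hA, List.zip_cons_cons, ihx]

-- ===== VERDICT =====
theorem compress_indices_py_spec : Claim_equal_compress_indices_py := by
  intro items _
  unfold Spec_compress_indices_py compress_indices_py compress_indices_py_alt
  have hperm : (PySem.List.sorted (PySem.Set.ofList items) (fun x => x) false).Perm
      (PySem.Set.ofList items) := PySem.List.sorted_perm _ _ _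
  have hpw := PySem.List.sorted_ofList_pairwise_lt (xs := items)
  have hc : ∀ w : Int, PySem.Set.contains (PySem.Set.ofList items) w
      = decide (w ∈ PySem.List.sorted (PySem.Set.ofList items) (fun x => x) false) := by
    intro w
    by_cases h : w ∈ PySem.List.sorted (PySem.Set.ofList items) (fun x => x) false
    · simp only [h, decide_true]
      exact (PySem.Set.contains_iff _ _).mpr (hperm.mem_iff.mp h)
    · simp only [h, decide_false]
      cases hval : PySem.Set.contains (PySem.Set.ofList items) w
      · rfl
      · exact absurd (hperm.mem_iff.mpr ((PySem.Set.contains_iff _ _).mp hval)) h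
  have hsf : ∀ p : Int → Bool,
      PySem.List.sorted ((PySem.Set.ofList items).filter p) (fun x => x) false
        = (PySem.List.sorted (PySem.Set.ofList items) (fun x => x) false).filter p := by
    intro p
    apply PySem.List.sorted_eq_of_perm_of_pairwise_lt
    · exact hperm.filter p
    · exact List.Pairwise.filter p hpw
  simp only []
  rw [hsf, hsf]
  have hstarts :
      (PySem.List.sorted (PySem.Set.ofList items) (fun x => x) false).filter
          (fun x => !(PySem.Set.contains (PySem.Set.ofList items) (x - 1)))
        = pvStarts (PySem.List.sorted (PySem.Set.ofList items) (fun x => x) false) := by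
    unfold pvStarts
    apply List.filter_congr
    intro y _
    rw [hc]
  have hends :
      (PySem.List.sorted (PySem.Set.ofList items) (fun x => x) false).filter
          (fun x => !(PySem.Set.contains (PySem.Set.ofList items) (x + 1)))
        = pvEnds (PySem.List.sorted (PySem.Set.ofList items) (fun x => x) false) := by
    unfold pvEnds
    apply List.filter_congr
    intro y _
    rw [hc]
  rw [hstarts, hends]
  cases harr : PySem.List.sorted (PySem.Set.ofList items) (fun x => x) false with
  | nil =>
    simp only [pvStarts, pvEnds, List.filter_nil]
    rfl
  | cons a rest =>
    simp only []
    rw [PySem.List.foldl_append_singleton_eq_map, pvFold_eq rest [] a a]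
    rw [pvMain rest a (harr ▸ hpw)]
    simp
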